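-- pv_equiv track=rewrite | github.com/vinhdq842/soe-vinorm | soe_vinorm/text_processor.py | _handle_slash_patterns
-- ===== SOURCE A (Python) =====
-- from typing import List, Tuple, Union
--
-- def _handle_slash_patterns(token_list: List[str]) -> List[str]:
--     """Handle special slash patterns in token list."""
--     if not token_list:
--         return token_list
--
--     result = token_list.copy()
--
--     # Handle ending slashes
--     if result and result[-1] and result[-1][-1] == "/":
--         tmp = []
--         while result[-1] and result[-1][-1] == "/":
--             result[-1] = result[-1][:-1]
--             tmp.append("/")
--         result.extend(tmp)
--
--     # Handle starting slashes
--     if result and result[0] and result[0][0] == "/":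
--         tmp = []
--         while result[0] and result[0][0] == "/":
--             result[0] = result[0][1:]
--             tmp.append("/")
--         result = tmp + result
--
--     return result
-- ===== SOURCE B (Python) =====
-- from typing import List, Tuple, Union
--
-- def _handle_slash_patterns(token_list: List[str]) -> List[str]:
--     """Handle special slash patterns in token list."""
--     if not token_list:
--         return token_list
--
--     result = token_list.copy()
--
--     # Move trailing slashes of the last token into their own tokens
--     tok = result[-1]
--     stripped = tok.rstrip("/")
--     result[-1] = stripped
--     result += ["/"] * (len(tok) - len(stripped))
--
--     # Move leading slashes of the (new) first token into their own tokens
--     head = result[0]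
--     bare = head.lstrip("/")
--     result[0] = bare
--     return ["/"] * (len(head) - len(bare)) + result
-- ===== Notes on version B (the rewrite author's own statement) =====
-- stated objective: simpler
-- what changed: Replaces A's two char-by-char while loops (with temporary slash lists and repeated string re-slicing) by computing the slash counts at once via rstrip('/')/lstrip('/') length differences and splicing with list concatenation.
import Mathlib
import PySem

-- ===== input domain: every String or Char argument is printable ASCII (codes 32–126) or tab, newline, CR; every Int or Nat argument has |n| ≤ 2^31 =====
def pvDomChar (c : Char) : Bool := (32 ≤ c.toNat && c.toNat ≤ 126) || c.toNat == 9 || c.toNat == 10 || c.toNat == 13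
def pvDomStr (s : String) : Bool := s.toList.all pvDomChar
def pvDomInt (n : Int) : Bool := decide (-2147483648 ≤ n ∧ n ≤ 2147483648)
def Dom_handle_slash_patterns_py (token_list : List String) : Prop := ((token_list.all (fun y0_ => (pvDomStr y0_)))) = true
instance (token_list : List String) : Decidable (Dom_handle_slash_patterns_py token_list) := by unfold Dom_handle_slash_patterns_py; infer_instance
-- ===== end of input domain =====

-- B moves the boundary slashes with rstrip/lstrip counts and list concatenation
-- instead of A's two char-by-char while loops (objective: simpler decomposition).


-- ===== PORT A =====
-- A's inner while loop on the LAST token: while result[-1] and result[-1][-1] == "/":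
--   result[-1] = result[-1][:-1]; tmp.append("/")
def pvLoopEnd (cs : List Char) (tmp : List String) : List Char × List String :=
  if cs.getLast? = some '/' then pvLoopEnd cs.dropLast (tmp ++ ["/"]) else (cs, tmp)
termination_by cs.length
decreasing_by
  cases cs with
  | nil => simp_all
  | cons a l => simp [List.length_dropLast]

-- A's inner while loop on the FIRST token: while result[0] and result[0][0] == "/":
--   result[0] = result[0][1:]; tmp.append("/")
def pvLoopStart (cs : List Char) (tmp : List String) : List Char × List String :=
  if cs.head? = some '/' then pvLoopStart cs.tail (tmp ++ ["/"]) else (cs, tmp)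
termination_by cs.length
decreasing_by
  cases cs with
  | nil => simp_all
  | cons a l => simp

-- "Handle ending slashes" block of A
def pvApplyEnd (result : List String) : List String :=
  match result.getLast? with
  | none => result
  | some s =>
    if s.toList.getLast? = some '/' then
      let (cs, tmp) := pvLoopEnd s.toList []
      result.dropLast ++ [String.ofList cs] ++ tmp
    else result

-- "Handle starting slashes" block of A
def pvApplyStart (result : List String) : List String :=
  match result with
  | [] => []
  | s :: rest =>
    if s.toList.head? = some '/' then
      let (cs, tmp) := pvLoopStart s.toList []
      tmp ++ (String.ofList cs :: rest)
    else s :: rest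

def handle_slash_patterns_py (token_list : List String) : List String :=
  if token_list = [] then token_list
  else pvApplyStart (pvApplyEnd token_list)

-- ===== PORT B =====
-- Source B: rstrip('/') on the last token, count, append; then lstrip('/') on the new
-- first token, count, prepend.  rstrip('/')/lstrip('/') are ported as
-- reverse-dropWhile-reverse / dropWhile on the character list (exact for these calls).
def handle_slash_patterns_py_alt (token_list : List String) : List String :=
  match token_list.getLast? with
  | none => token_list
  | some tok =>
    let stripped := (tok.toList.reverse.dropWhile (· = '/')).reverse
    let result := token_list.dropLast ++ [String.ofList stripped]
        ++ List.replicate (tok.toList.length - stripped.length) "/"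
    match result with
    | [] => []
    | head :: rest =>
      let bare := head.toList.dropWhile (· = '/')
      List.replicate (head.toList.length - bare.length) "/" ++ (String.ofList bare :: rest)

-- ===== PRECONDITION & SPEC =====
def Spec_handle_slash_patterns_py (token_list : List String) (out : List String) : Prop := out = handle_slash_patterns_py_alt token_list
instance (token_list : List String) (out : List String) : Decidable (Spec_handle_slash_patterns_py token_list out) := by unfold Spec_handle_slash_patterns_py; infer_instance

-- ===== CLAIM (what is proved, stated in full; the proofs are below) =====
def Claim_equal_handle_slash_patterns_py : Prop := ∀ (token_list : List String), Dom_handle_slash_patterns_py token_list → Spec_handle_slash_patterns_py token_list (handle_slash_patterns_py token_list)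

-- ===== LEMMAS AND PROOFS =====

-- A's trailing-slash while loop computes the reverse-dropWhile form and one "/" per removed char.
theorem pvLoopEnd_eq (rs : List Char) (tmp : List String) :
    pvLoopEnd rs.reverse tmp =
      ((rs.dropWhile (· = '/')).reverse,
        tmp ++ List.replicate (rs.length - (rs.dropWhile (· = '/')).length) "/") := by
  induction rs generalizing tmp with
  | nil => simp [pvLoopEnd]
  | cons c l ih =>
    rw [pvLoopEnd]
    by_cases hc : c = '/'
    · subst hc
      have h1 : ((('/' : Char) :: l).reverse).getLast? = some '/' := by simp
      rw [if_pos h1]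
      have h2 : ((('/' : Char) :: l).reverse).dropLast = l.reverse := by simp
      rw [h2, ih]
      have hle := List.length_dropWhile_le (· = '/') l
      have : ('/' :: l).length - ((('/' :: l).dropWhile (· = '/'))).length
          = (l.length - (l.dropWhile (· = '/')).length) + 1 := by
        simp [List.dropWhile_cons]; omega
      rw [this]
      simp [List.replicate_succ]
    · have h1 : (((c : Char) :: l).reverse).getLast? = some c := by simp
      rw [if_neg (by simp [hc])]
      simp [hc]

-- A's leading-slash while loop computes dropWhile and one "/" per removed char.
theorem pvLoopStart_eq (cs : List Char) (tmp : List String) :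
    pvLoopStart cs tmp =
      (cs.dropWhile (· = '/'),
        tmp ++ List.replicate (cs.length - (cs.dropWhile (· = '/')).length) "/") := by
  induction cs generalizing tmp with
  | nil => simp [pvLoopStart]
  | cons c l ih =>
    rw [pvLoopStart]
    by_cases hc : c = '/'
    · subst hc
      rw [if_pos (by simp)]
      simp only [List.tail_cons]
      rw [ih]
      have hle := List.length_dropWhile_le (· = '/') l
      have : ('/' :: l).length - ((('/' :: l).dropWhile (· = '/'))).length
          = (l.length - (l.dropWhile (· = '/')).length) + 1 := by
        simp [List.dropWhile_cons]; omega
      rw [this]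
      simp [List.replicate_succ]
    · rw [if_neg (by simp [hc])]
      simp [hc]

-- dropWhile is the identity when the first element does not match.
theorem dropWhile_eq_self_of_head (l : List Char) (h : l.head? ≠ some '/') :
    l.dropWhile (· = '/') = l := by
  cases l with
  | nil => rfl
  | cons c t =>
    have : ¬ (c = '/') := by simp at h; exact h
    simp [this]

-- B's first phase equals A's "ending slashes" block.
theorem phase_end_eq (init : List String) (tok : String) :
    pvApplyEnd (init ++ [tok]) =
      init ++ [String.ofList ((tok.toList.reverse.dropWhile (· = '/')).reverse)]
        ++ List.replicate
            (tok.toList.length - ((tok.toList.reverse.dropWhile (· = '/')).reverse).length) "/" := by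
  unfold pvApplyEnd
  have hlast : (init ++ [tok]).getLast? = some tok := by simp
  rw [hlast]
  dsimp only
  by_cases h : tok.toList.getLast? = some '/'
  · rw [if_pos h]
    have := pvLoopEnd_eq tok.toList.reverse []
    rw [List.reverse_reverse] at this
    rw [this]
    simp [List.length_reverse]
  · rw [if_neg h]
    have hh : tok.toList.reverse.head? ≠ some '/' := by
      rw [List.head?_reverse]; exact h
    rw [dropWhile_eq_self_of_head _ hh]
    simp

-- B's second phase equals A's "starting slashes" block.
theorem phase_start_eq (head : String) (rest : List String) :
    pvApplyStart (head :: rest) =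
      List.replicate (head.toList.length - (head.toList.dropWhile (· = '/')).length) "/"
        ++ (String.ofList (head.toList.dropWhile (· = '/')) :: rest) := by
  unfold pvApplyStart
  dsimp only
  by_cases h : head.toList.head? = some '/'
  · rw [if_pos h, pvLoopStart_eq]
    simp
  · rw [if_neg h, dropWhile_eq_self_of_head _ h]
    simp

-- ===== VERDICT (by name: the statement is the Claim_ definition above) =====
theorem handle_slash_patterns_py_spec : Claim_equal_handle_slash_patterns_py := by
  intro token_list _
  unfold Spec_handle_slash_patterns_py handle_slash_patterns_py handle_slash_patterns_py_alt
  rcases token_list.eq_nil_or_concat with h | ⟨init, tok, h⟩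
  · subst h; simp
  · subst h
    rw [if_neg (by simp [List.concat_eq_append])]
    simp only [List.concat_eq_append]
    have hlast : (init ++ [tok]).getLast? = some tok := by simp
    rw [hlast]
    simp only [List.dropLast_concat]
    rw [phase_end_eq]
    cases init with
    | nil =>
      simp only [List.nil_append, List.singleton_append]
      rw [phase_start_eq]
    | cons a t =>
      simp only [List.cons_append]
      rw [phase_start_eq]
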